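-- pv_equiv track=rewrite | github.com/andrmagg2001/Conditional-Music-Generation | code/python/manifest_to_jsonl.py | limit_polyphony_per_step
-- ===== SOURCE A (Python) =====
-- def limit_polyphony_per_step(evs: list, max_poly: int) -> list:
--     """Limit number of notes that start at the same step (keep highest-velocity first)."""
--     if max_poly is None or max_poly <= 0:
--         return evs
--
--     buckets = {}
--     for ev in evs:
--         s = int(ev["start_step"])
--         buckets.setdefault(s, []).append(ev)
--
--     out = []
--     for s, group in buckets.items():
--         if len(group) <= max_poly:
--             out.extend(group)
--             continue
--         group_sorted = sorted(group, key=lambda x: (-int(x["velocity"]), int(x["pitch"]), int(x["end_step"])))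
--         out.extend(group_sorted[:max_poly])
--
--     out = sorted(out, key=lambda x: (int(x["start_step"]), int(x["end_step"]), int(x["pitch"]), int(x["velocity"])))
--     return out
-- ===== SOURCE B (Python) =====
-- def limit_polyphony_per_step(evs: list, max_poly: int) -> list:
--     """One global sort + one linear counting pass instead of per-step buckets."""
--     if max_poly is None or max_poly <= 0:
--         return evs
--
--     ordered = sorted(evs, key=lambda x: (int(x["start_step"]), -int(x["velocity"]),
--                                          int(x["pitch"]), int(x["end_step"])))
--     kept = []
--     counts = {}
--     for ev in ordered:
--         s = int(ev["start_step"])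
--         c = counts.get(s, 0)
--         if c < max_poly:
--             kept.append(ev)
--             counts[s] = c + 1
--
--     return sorted(kept, key=lambda x: (int(x["start_step"]), int(x["end_step"]),
--                                        int(x["pitch"]), int(x["velocity"])))
-- ===== Notes on version B (the rewrite author's own statement) =====
-- stated objective: alternative
-- what changed: Replaces the per-start-step bucket dict with per-group sorting and truncation by a single global stable sort of all events followed by one linear counting pass that keeps the first max_poly events of each start_step; the bucket structure and per-group sorts disappear.
import Mathlib
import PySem

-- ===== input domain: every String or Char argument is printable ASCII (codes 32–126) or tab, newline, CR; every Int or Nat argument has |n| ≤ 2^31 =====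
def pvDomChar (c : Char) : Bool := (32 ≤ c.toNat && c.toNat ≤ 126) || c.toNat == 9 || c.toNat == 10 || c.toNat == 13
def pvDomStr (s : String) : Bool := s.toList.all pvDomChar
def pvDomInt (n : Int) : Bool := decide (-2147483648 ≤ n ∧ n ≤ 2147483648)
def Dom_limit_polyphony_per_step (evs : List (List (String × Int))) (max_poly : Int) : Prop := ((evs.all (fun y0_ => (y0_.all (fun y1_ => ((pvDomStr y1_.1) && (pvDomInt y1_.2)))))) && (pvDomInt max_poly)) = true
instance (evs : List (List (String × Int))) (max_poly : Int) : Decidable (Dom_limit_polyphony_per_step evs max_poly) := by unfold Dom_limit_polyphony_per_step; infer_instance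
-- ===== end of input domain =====

-- B replaces A's per-start-step bucket dict with per-group sorts by ONE global stable sort plus a single
-- linear counting pass (objective: alternative, same asymptotic cost).
-- Events are Python dicts → association lists; ev["k"] is ported as first-match lookup with default 0,
-- which is exact on Pre_ (all four keys present); lexicographic tuple sort keys are encoded base 2^34 with
-- offset 2^32, exact for |field| ≤ 2^31 (Dom).

-- ===== PORT A =====
def pvFld (ev : List (String × Int)) (k : String) : Int := (PySem.Dict.mk ev).getD k 0

def pvO : Int := 4294967296     -- 2^32
def pvS : Int := 17179869184    -- 2^34

-- key=lambda x: (-x["velocity"], x["pitch"], x["end_step"]) encoded as one Int (exact under Dom)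
def pvKeyGroup (ev : List (String × Int)) : Int :=
  ((pvO - pvFld ev "velocity") * pvS + (pvFld ev "pitch" + pvO)) * pvS + (pvFld ev "end_step" + pvO)

-- key=lambda x: (x["start_step"], x["end_step"], x["pitch"], x["velocity"]) encoded as one Int
def pvKeyOut (ev : List (String × Int)) : Int :=
  (((pvFld ev "start_step" + pvO) * pvS + (pvFld ev "end_step" + pvO)) * pvS
      + (pvFld ev "pitch" + pvO)) * pvS + (pvFld ev "velocity" + pvO)

def limit_polyphony_per_step (evs : List (List (String × Int))) (max_poly : Int) : List (List (String × Int)) :=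
  if max_poly ≤ 0 then evs
  else
    -- buckets.setdefault(s, []).append(ev)  ==  modify s [] (· ++ [ev])
    let buckets := evs.foldl
      (fun d ev => d.modify (pvFld ev "start_step") [] (fun g => g ++ [ev])) PySem.Dict.empty
    let out := buckets.items.foldl
      (fun out sg =>
        if (sg.2.length : Int) ≤ max_poly then out ++ sg.2
        else out ++ (PySem.List.sorted sg.2 pvKeyGroup).take max_poly.toNat) []  -- [:max_poly] = take (max_poly > 0)
    PySem.List.sorted out pvKeyOut

-- ===== PORT B =====
-- key=lambda x: (x["start_step"], -x["velocity"], x["pitch"], x["end_step"]) encoded as one Int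
def pvKeyAll (ev : List (String × Int)) : Int :=
  (pvFld ev "start_step" + pvO) * (pvS * pvS * pvS) + pvKeyGroup ev

def limit_polyphony_per_step_alt (evs : List (List (String × Int))) (max_poly : Int) : List (List (String × Int)) :=
  if max_poly ≤ 0 then evs
  else
    let ordered := PySem.List.sorted evs pvKeyAll
    let st := ordered.foldl
      (fun (st : List (List (String × Int)) × PySem.Dict Int Int) ev =>
        let s := pvFld ev "start_step"
        let c := st.2.getD s 0
        if c < max_poly then (st.1 ++ [ev], st.2.insert s (c + 1)) else st)
      ([], PySem.Dict.empty)
    PySem.List.sorted st.1 pvKeyOut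

-- ===== PRECONDITION & SPEC =====
-- Pre_ excludes exactly the inputs on which Python A raises KeyError: max_poly > 0 and some event
-- missing one of the four fields (with max_poly > 0 every event's four fields are read).
def Pre_limit_polyphony_per_step (evs : List (List (String × Int))) (max_poly : Int) : Prop :=
  max_poly ≤ 0 ∨ ∀ ev ∈ evs,
    "start_step" ∈ ev.map Prod.fst ∧ "velocity" ∈ ev.map Prod.fst ∧
    "pitch" ∈ ev.map Prod.fst ∧ "end_step" ∈ ev.map Prod.fst
instance (evs : List (List (String × Int))) (max_poly : Int) : Decidable (Pre_limit_polyphony_per_step evs max_poly) := by unfold Pre_limit_polyphony_per_step; infer_instance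

def pvWitness_limit_polyphony_per_step : (List (List (String × Int))) × Int :=
  ([[("start_step", 0), ("end_step", 2), ("pitch", 60), ("velocity", 90)],
    [("start_step", 0), ("end_step", 1), ("pitch", 64), ("velocity", 100)],
    [("start_step", 4), ("end_step", 6), ("pitch", 60), ("velocity", 80)]], 1)

def Spec_limit_polyphony_per_step (evs : List (List (String × Int))) (max_poly : Int) (out : List (List (String × Int))) : Prop := out = limit_polyphony_per_step_alt evs max_poly
instance (evs : List (List (String × Int))) (max_poly : Int) (out : List (List (String × Int))) : Decidable (Spec_limit_polyphony_per_step evs max_poly out) := by unfold Spec_limit_polyphony_per_step; infer_instance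

-- ===== CLAIM (what is proved, stated in full; the proofs are below) =====
def Claim_equal_limit_polyphony_per_step : Prop := ∀ (evs : List (List (String × Int))) (max_poly : Int), Dom_limit_polyphony_per_step evs max_poly → Pre_limit_polyphony_per_step evs max_poly → Spec_limit_polyphony_per_step evs max_poly (limit_polyphony_per_step evs max_poly)

-- ===== LEMMAS AND PROOFS =====

-- insertion (insertBy) preserves key-sortedness
theorem pvPairwise_insertBy {α κ : Type} [LinearOrder κ] (key : α → κ) (x : α) (ys : List α)
    (h : ys.Pairwise (fun a b => key a ≤ key b)) :
    (PySem.List.insertBy (fun a b => decide (key a < key b)) x ys).Pairwise (fun a b => key a ≤ key b) := by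
  induction ys with
  | nil => simp [PySem.List.insertBy]
  | cons y ys ih =>
    simp only [PySem.List.insertBy]
    rcases List.pairwise_cons.mp h with ⟨hy, hys⟩
    by_cases hb : key x < key y
    · simp only [decide_eq_true_eq, hb, if_pos]
      exact List.pairwise_cons.mpr ⟨by
        intro z hz
        rcases List.mem_cons.mp hz with rfl | hz
        · exact le_of_lt hb
        · exact le_trans (le_of_lt hb) (hy z hz), h⟩
    · simp only [decide_eq_true_eq, hb, if_neg, not_false_iff]
      refine List.pairwise_cons.mpr ⟨?_, ih hys⟩
      intro z hz
      rcases (PySem.List.mem_insertBy _ x z ys).mp hz with rfl | hz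
      · exact le_of_not_gt hb
      · exact hy z hz

theorem pvInsertBy_head {α : Type} (bf : α → α → Bool) (x : α) (l : List α)
    (h : ∀ z ∈ l, bf x z = true) : PySem.List.insertBy bf x l = x :: l := by
  cases l with
  | nil => simp [PySem.List.insertBy]
  | cons y ys => simp [PySem.List.insertBy, h y (List.mem_cons_self)]

theorem pvFilter_insertBy_pos {α κ : Type} [LinearOrder κ] (key : α → κ) (p : α → Bool) (x : α)
    (ys : List α) (hx : p x = true) (hys : ys.Pairwise (fun a b => key a ≤ key b)) :
    (PySem.List.insertBy (fun a b => decide (key a < key b)) x ys).filter p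
      = PySem.List.insertBy (fun a b => decide (key a < key b)) x (ys.filter p) := by
  induction ys with
  | nil => simp [PySem.List.insertBy, hx]
  | cons y ys ih =>
    rcases List.pairwise_cons.mp hys with ⟨hy, hys'⟩
    simp only [PySem.List.insertBy]
    by_cases hb : key x < key y
    · simp only [decide_eq_true_eq, hb, if_pos]
      by_cases hp : p y
      · simp [List.filter_cons, hx, hp, PySem.List.insertBy, hb]
      · simp only [List.filter_cons, hx, hp, if_pos, if_neg, Bool.false_eq_true, not_false_iff]
        rw [pvInsertBy_head]
        intro z hz
        have hzys := List.mem_filter.mp hz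
        exact decide_eq_true (lt_of_lt_of_le hb (hy z hzys.1))
    · simp only [decide_eq_true_eq, hb, if_neg, not_false_iff]
      by_cases hp : p y
      · simp only [List.filter_cons, hp, if_pos, PySem.List.insertBy, decide_eq_true_eq, hb,
          not_false_iff]
        rw [ih hys']
        simp
      · simp only [List.filter_cons, hp, Bool.false_eq_true, if_neg, not_false_iff]
        exact ih hys' 

theorem pvFilter_insertBy_neg {α : Type} (bf : α → α → Bool) (p : α → Bool) (x : α)
    (ys : List α) (hx : p x = false) :
    (PySem.List.insertBy bf x ys).filter p = ys.filter p := by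
  induction ys with
  | nil => simp [PySem.List.insertBy, hx]
  | cons y ys ih =>
    simp only [PySem.List.insertBy]
    by_cases hb : bf x y = true
    · simp [List.filter_cons, hb, hx]
    · simp only [hb, if_neg, not_false_iff, Bool.false_eq_true]
      by_cases hp : p y
      · simp [List.filter_cons, hp, ih]
      · simp [List.filter_cons, hp, ih]

theorem pvSorted_filter_aux {α κ : Type} [LinearOrder κ] (key : α → κ) (p : α → Bool) :
    ∀ (xs acc : List α), acc.Pairwise (fun a b => key a ≤ key b) →
    (xs.foldl (fun acc x => PySem.List.insertBy (fun a b => decide (key a < key b)) x acc) acc).filter p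
      = (xs.filter p).foldl (fun acc x => PySem.List.insertBy (fun a b => decide (key a < key b)) x acc) (acc.filter p) := by
  intro xs
  induction xs with
  | nil => intro acc _; rfl
  | cons x xs ih =>
    intro acc hacc
    simp only [List.foldl_cons]
    rw [ih _ (pvPairwise_insertBy key x acc hacc)]
    by_cases hp : p x
    · simp only [List.filter_cons, hp, if_pos, List.foldl_cons]
      rw [pvFilter_insertBy_pos key p x acc hp hacc]
    · simp only [List.filter_cons, hp, Bool.false_eq_true, if_neg, not_false_iff]
      rw [pvFilter_insertBy_neg _ p x acc (Bool.not_eq_true _ ▸ hp)]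

theorem pvSorted_filter {α κ : Type} [LinearOrder κ] (key : α → κ) (p : α → Bool) (xs : List α) :
    (PySem.List.sorted xs key).filter p = PySem.List.sorted (xs.filter p) key := by
  rw [PySem.List.sorted_eq_foldl_insertBy, PySem.List.sorted_eq_foldl_insertBy]
  simpa using pvSorted_filter_aux key p xs [] List.Pairwise.nil

theorem pvInsertBy_congr {α : Type} (bf bf' : α → α → Bool) (x : α) (l : List α)
    (h : ∀ z ∈ l, bf x z = bf' x z) :
    PySem.List.insertBy bf x l = PySem.List.insertBy bf' x l := by
  induction l with
  | nil => rfl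
  | cons y l ih =>
    simp only [PySem.List.insertBy]
    rw [h y (List.mem_cons_self)]
    by_cases hb : bf' x y = true
    · simp [hb]
    · simp only [hb, if_neg, not_false_iff, Bool.false_eq_true]
      rw [ih (fun z hz => h z (List.mem_cons_of_mem _ hz))]

theorem pvSorted_congr_aux {α κ : Type} [LinearOrder κ] (key key' : α → κ) :
    ∀ (xs acc : List α),
    (∀ a b, (a ∈ acc ∨ a ∈ xs) → (b ∈ acc ∨ b ∈ xs) →
        decide (key a < key b) = decide (key' a < key' b)) →
    xs.foldl (fun acc x => PySem.List.insertBy (fun a b => decide (key a < key b)) x acc) acc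
      = xs.foldl (fun acc x => PySem.List.insertBy (fun a b => decide (key' a < key' b)) x acc) acc := by
  intro xs
  induction xs with
  | nil => intro acc _; rfl
  | cons x xs ih =>
    intro acc h
    simp only [List.foldl_cons]
    rw [pvInsertBy_congr (fun a b => decide (key a < key b)) (fun a b => decide (key' a < key' b)) x acc
        (fun z hz => h x z (Or.inr List.mem_cons_self) (Or.inl hz))]
    refine ih _ ?_
    intro a b ha hb
    refine h a b ?_ ?_
    · rcases ha with ha | ha
      · rcases (PySem.List.mem_insertBy _ x a acc).mp ha with rfl | ha
        · exact Or.inr List.mem_cons_self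
        · exact Or.inl ha
      · exact Or.inr (List.mem_cons_of_mem _ ha)
    · rcases hb with hb | hb
      · rcases (PySem.List.mem_insertBy _ x b acc).mp hb with rfl | hb
        · exact Or.inr List.mem_cons_self
        · exact Or.inl hb
      · exact Or.inr (List.mem_cons_of_mem _ hb)

theorem pvSorted_congr {α κ : Type} [LinearOrder κ] (key key' : α → κ) (xs : List α)
    (h : ∀ a b, a ∈ xs → b ∈ xs → decide (key a < key b) = decide (key' a < key' b)) :
    PySem.List.sorted xs key = PySem.List.sorted xs key' := by
  rw [PySem.List.sorted_eq_foldl_insertBy, PySem.List.sorted_eq_foldl_insertBy]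
  refine pvSorted_congr_aux key key' xs [] ?_
  intro a b ha hb
  rcases ha with ha | ha
  · simp at ha
  rcases hb with hb | hb
  · simp at hb
  exact h a b ha hb

theorem pvSorted_const {α κ : Type} [LinearOrder κ] (key : α → κ) (v : κ) (l : List α)
    (h : ∀ x ∈ l, key x = v) : PySem.List.sorted l key = l := by
  refine PySem.List.sorted_eq_self_of_pairwise l key ?_
  refine List.pairwise_of_forall_mem_list ?_
  intro a ha b hb
  rw [h a ha, h b hb]

-- two key-sorted lists with the same per-key classes are equal (stability, uniqueness form)
theorem pvSorted_unique {α κ : Type} [LinearOrder κ] [BEq κ] [LawfulBEq κ] (key : α → κ) :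
    ∀ (l1 l2 : List α), l1.Pairwise (fun a b => key a ≤ key b) →
    l2.Pairwise (fun a b => key a ≤ key b) →
    (∀ v, l1.filter (fun x => key x == v) = l2.filter (fun x => key x == v)) →
    l1 = l2 := by
  intro l1
  induction l1 with
  | nil =>
    intro l2 _ _ h
    cases l2 with
    | nil => rfl
    | cons b t2 =>
      have := h (key b)
      simp at this
  | cons a t1 ih =>
    intro l2 h1 h2 h
    cases l2 with
    | nil =>
      have := h (key a)
      simp at this
    | cons b t2 =>
      have hab : key a = key b := by
        have hne1 : (List.filter (fun x => key x == key b) (a :: t1)) ≠ [] := by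
          rw [h (key b)]; simp
        have hex := List.filter_eq_nil_iff.not.mp hne1
        push Not at hex
        obtain ⟨x, hx, hxk⟩ := hex
        have hxb : key x = key b := by simpa using hxk
        have hale : key a ≤ key b := by
          rcases List.mem_cons.mp hx with rfl | hx
          · exact le_of_eq hxb
          · exact hxb ▸ (List.pairwise_cons.mp h1).1 x hx
        have hne2 : (List.filter (fun x => key x == key a) (b :: t2)) ≠ [] := by
          rw [← h (key a)]; simp
        have hex2 := List.filter_eq_nil_iff.not.mp hne2
        push Not at hex2
        obtain ⟨y, hy, hyk⟩ := hex2
        have hya : key y = key a := by simpa using hyk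
        have hble : key b ≤ key a := by
          rcases List.mem_cons.mp hy with rfl | hy
          · exact le_of_eq hya
          · exact hya ▸ (List.pairwise_cons.mp h2).1 y hy
        exact le_antisymm hale hble
      have hkey := h (key a)
      rw [List.filter_cons, List.filter_cons] at hkey
      rw [if_pos (by simp), if_pos (by simp [← hab])] at hkey
      obtain ⟨rfl, htails⟩ := List.cons_eq_cons.mp hkey
      congr 1
      refine ih t2 (List.pairwise_cons.mp h1).2 (List.pairwise_cons.mp h2).2 ?_
      intro v
      by_cases hv : v = key a
      · subst hv; exact htails
      · have h' := h v
        rw [List.filter_cons, List.filter_cons] at h'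
        rw [if_neg (by simp only [beq_iff_eq]; exact fun hcon => hv hcon.symm),
            if_neg (by simp only [beq_iff_eq]; exact fun hcon => hv hcon.symm)] at h'
        exact h'

-- stable sorts of two lists with the same per-key classes are equal
theorem pvSorted_classes {α κ : Type} [LinearOrder κ] [BEq κ] [LawfulBEq κ] (key : α → κ)
    (l1 l2 : List α)
    (h : ∀ v, l1.filter (fun x => key x == v) = l2.filter (fun x => key x == v)) :
    PySem.List.sorted l1 key = PySem.List.sorted l2 key := by
  refine pvSorted_unique key (PySem.List.sorted l1 key) (PySem.List.sorted l2 key)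
    (PySem.List.sorted_pairwise l1 key) (PySem.List.sorted_pairwise l2 key) ?_
  intro v
  rw [pvSorted_filter, pvSorted_filter, h v]

-- bounds of every field value of an event drawn from a Dom-bounded event list
theorem pvFld_bound (evs : List (List (String × Int)))
    (hall : evs.all (fun ev => ev.all (fun p => pvDomStr p.1 && pvDomInt p.2)) = true)
    {ev : List (String × Int)} (hev : ev ∈ evs) (k : String) :
    -2147483648 ≤ pvFld ev k ∧ pvFld ev k ≤ 2147483648 := by
  unfold pvFld
  rw [PySem.Dict.getD_eq_get?_getD]
  cases hg : (PySem.Dict.mk ev).get? k with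
  | none => exact ⟨by norm_num, by norm_num⟩
  | some w =>
    have hmem : (k, w) ∈ ev := PySem.Dict.mem_items_of_get?_eq_some _ hg
    rw [List.all_eq_true] at hall
    have h2 := hall ev hev
    rw [List.all_eq_true] at h2
    have h3 := (Bool.and_eq_true _ _ |>.mp (h2 (k, w) hmem)).2
    simp only [pvDomInt, decide_eq_true_eq] at h3
    simpa using h3

-- the base-2^34 encoding of the final sort key is injective on Dom-bounded fields
theorem pvKeyOut_inj (a b : List (String × Int))
    (ha : ∀ k, -2147483648 ≤ pvFld a k ∧ pvFld a k ≤ 2147483648)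
    (hb : ∀ k, -2147483648 ≤ pvFld b k ∧ pvFld b k ≤ 2147483648)
    (h : pvKeyOut a = pvKeyOut b) :
    pvFld a "start_step" = pvFld b "start_step" ∧ pvFld a "end_step" = pvFld b "end_step" ∧
    pvFld a "pitch" = pvFld b "pitch" ∧ pvFld a "velocity" = pvFld b "velocity" := by
  have h1 := ha "start_step"; have h2 := ha "end_step"
  have h3 := ha "pitch"; have h4 := ha "velocity"
  have h5 := hb "start_step"; have h6 := hb "end_step"
  have h7 := hb "pitch"; have h8 := hb "velocity"
  unfold pvKeyOut pvO pvS at h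
  omega

theorem pvKeyGroup_congr (a b : List (String × Int))
    (he : pvFld a "end_step" = pvFld b "end_step") (hp : pvFld a "pitch" = pvFld b "pitch")
    (hv : pvFld a "velocity" = pvFld b "velocity") : pvKeyGroup a = pvKeyGroup b := by
  unfold pvKeyGroup
  rw [he, hp, hv]

-- on events with equal start_step, the global key compares like the group key
theorem pvKeyAll_lt_iff (a b : List (String × Int))
    (hs : pvFld a "start_step" = pvFld b "start_step") :
    decide (pvKeyAll a < pvKeyAll b) = decide (pvKeyGroup a < pvKeyGroup b) := by
  unfold pvKeyAll
  rw [hs]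
  exact decide_eq_decide.mpr (by omega)

-- the bucket dict groups evs by start_step: lookup is the filter, keys are the distinct starts
theorem pvBuckets_getD (evs : List (List (String × Int))) (s : Int) :
    (evs.foldl (fun d ev => d.modify (pvFld ev "start_step") [] (fun g => g ++ [ev]))
        PySem.Dict.empty).getD s []
      = evs.filter (fun ev => pvFld ev "start_step" == s) := by
  have hmap : evs.foldl (fun d ev => d.modify (pvFld ev "start_step") [] (fun g => g ++ [ev]))
        PySem.Dict.empty
      = (evs.map (fun ev => (pvFld ev "start_step", ev))).foldl
          (fun d p => d.modify p.1 [] (fun g => g ++ [p.2])) PySem.Dict.empty := by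
    rw [List.foldl_map]
  rw [hmap, PySem.Dict.getD_foldl_modify_append]
  simp [List.filter_map, Function.comp_def]

theorem pvBuckets_keys (evs : List (List (String × Int))) :
    (evs.foldl (fun d ev => d.modify (pvFld ev "start_step") [] (fun g => g ++ [ev]))
        PySem.Dict.empty).keys
      = PySem.Set.ofList (evs.map (fun ev => pvFld ev "start_step")) := by
  rw [PySem.Dict.keys_foldl_modify_key evs (fun ev => pvFld ev "start_step") []
        (fun _ ev => (fun g => g ++ [ev])) PySem.Dict.empty]
  rw [PySem.Dict.keys_empty, PySem.Set.update_nil_left]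

theorem pvBuckets_nodup (evs : List (List (String × Int))) :
    (evs.foldl (fun d ev => d.modify (pvFld ev "start_step") [] (fun g => g ++ [ev]))
        PySem.Dict.empty).keys.Nodup := by
  exact PySem.Dict.nodup_keys_foldl_modify_key evs (fun ev => pvFld ev "start_step") []
    (fun _ ev => (fun g => g ++ [ev])) PySem.Dict.empty (by rw [PySem.Dict.keys_empty]; exact List.nodup_nil)

-- A's out loop, written as a flatMap over the distinct starts
theorem pvOutA (evs : List (List (String × Int))) (m : Int) :
    ((evs.foldl (fun d ev => d.modify (pvFld ev "start_step") [] (fun g => g ++ [ev]))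
        PySem.Dict.empty).items).foldl
      (fun out sg =>
        if (sg.2.length : Int) ≤ m then out ++ sg.2
        else out ++ (PySem.List.sorted sg.2 pvKeyGroup).take m.toNat) []
    = (PySem.Set.ofList (evs.map (fun ev => pvFld ev "start_step"))).flatMap
        (fun s =>
          if (((evs.filter (fun ev => pvFld ev "start_step" == s)).length : Int) ≤ m) then
            evs.filter (fun ev => pvFld ev "start_step" == s)
          else (PySem.List.sorted (evs.filter (fun ev => pvFld ev "start_step" == s))
              pvKeyGroup).take m.toNat) := by
  rw [PySem.List.foldl_congr_mem _ _
      (fun out sg => out ++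
        (if (sg.2.length : Int) ≤ m then sg.2 else (PySem.List.sorted sg.2 pvKeyGroup).take m.toNat))
      _ (by intro acc x _; by_cases h : (x.2.length : Int) ≤ m <;> simp [h])]
  rw [PySem.List.foldl_append_eq_flatMap]
  rw [PySem.Dict.items_eq_map_keys _ (pvBuckets_nodup evs) []]
  rw [List.flatMap_map, pvBuckets_keys]
  simp only [List.nil_append]
  refine List.flatMap_congr ?_
  intro s _
  rw [pvBuckets_getD]

-- B's counting pass keeps, per start_step, the first max_poly events in scan order
theorem pvKept_filter (m s : Int) :
    ∀ (l k0 : List (List (String × Int))) (d0 : PySem.Dict Int Int),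
    (∀ t, 0 ≤ d0.getD t 0) →
    (List.foldl (fun (st : List (List (String × Int)) × PySem.Dict Int Int) ev =>
        let sv := pvFld ev "start_step"
        let c := st.2.getD sv 0
        if c < m then (st.1 ++ [ev], st.2.insert sv (c + 1)) else st) (k0, d0) l).1.filter
      (fun x => pvFld x "start_step" == s)
    = k0.filter (fun x => pvFld x "start_step" == s)
      ++ (l.filter (fun x => pvFld x "start_step" == s)).take (m.toNat - (d0.getD s 0).toNat) := by
  intro l
  induction l with
  | nil => intro k0 d0 _; simp
  | cons ev l ih =>
    intro k0 d0 hd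
    simp only [List.foldl_cons]
    by_cases hc : d0.getD (pvFld ev "start_step") 0 < m
    · simp only [hc, if_pos]
      rw [ih (k0 ++ [ev]) _ ?hd']
      case hd' =>
        intro t
        rw [PySem.Dict.getD_insert]
        split
        · have := hd (pvFld ev "start_step"); omega
        · exact hd t
      rw [List.filter_append, PySem.Dict.getD_insert]
      by_cases hs : pvFld ev "start_step" = s
      · have hc0 := hd (pvFld ev "start_step")
        rw [if_pos hs.symm ]
        rw [List.filter_cons, if_pos (by simpa using hs)]
        rw [List.filter_cons, if_pos (by simpa using hs)]
        have harith : m.toNat - (d0.getD s 0).toNat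
            = (m.toNat - (d0.getD (pvFld ev "start_step") 0 + 1).toNat) + 1 := by
          rw [hs] at hc0 hc ⊢
          omega
        rw [harith, List.take_succ_cons, List.append_assoc]
        rfl
      · rw [if_neg (fun hcon => hs hcon.symm)]
        rw [List.filter_cons, if_neg (by simpa using hs)]
        rw [List.filter_cons, if_neg (by simpa using hs)]
        simp
    · simp only [hc, if_neg, not_false_iff]
      rw [ih k0 d0 hd]
      by_cases hs : pvFld ev "start_step" = s
      · have hc0 := hd (pvFld ev "start_step")
        rw [List.filter_cons, if_pos (by simpa using hs)]
        have harith : m.toNat - (d0.getD s 0).toNat = 0 := by rw [hs] at hc0 hc; omega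
        rw [harith]
        simp
      · rw [List.filter_cons, if_neg (by simpa using hs)]

theorem pvKept_mem (m : Int) :
    ∀ (l : List (List (String × Int))) (st : List (List (String × Int)) × PySem.Dict Int Int)
    (x : List (String × Int)),
    x ∈ (List.foldl (fun (st : List (List (String × Int)) × PySem.Dict Int Int) ev =>
        let sv := pvFld ev "start_step"
        let c := st.2.getD sv 0
        if c < m then (st.1 ++ [ev], st.2.insert sv (c + 1)) else st) st l).1 →
    x ∈ st.1 ∨ x ∈ l := by
  intro l
  induction l with
  | nil => intro st x hx; exact Or.inl hx
  | cons ev l ih =>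
    intro st x hx
    simp only [List.foldl_cons] at hx
    by_cases hc : st.2.getD (pvFld ev "start_step") 0 < m
    · simp only [hc, if_pos] at hx
      rcases ih _ x hx with h | h
      · rcases List.mem_append.mp h with h | h
        · exact Or.inl h
        · exact Or.inr (List.mem_cons.mpr (Or.inl (List.mem_singleton.mp h)))
      · exact Or.inr (List.mem_cons_of_mem _ h)
    · simp only [hc, if_neg, not_false_iff] at hx
      rcases ih _ x hx with h | h
      · exact Or.inl h
      · exact Or.inr (List.mem_cons_of_mem _ h)

theorem pvFlatMap_single {α β : Type} (F : α → List β) (ks : List α) (s : α)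
    (hnd : ks.Nodup) (hs : s ∈ ks) (hz : ∀ s' ∈ ks, s' ≠ s → F s' = []) :
    ks.flatMap F = F s := by
  induction ks with
  | nil => cases hs
  | cons a ks ih =>
    rw [List.flatMap_cons]
    rcases List.mem_cons.mp hs with rfl | hs'
    · have : ks.flatMap F = [] := by
        apply List.flatMap_eq_nil_iff.mpr
        intro s' hs'
        exact hz s' (List.mem_cons_of_mem _ hs') (fun hcon => (List.nodup_cons.mp hnd).1 (hcon ▸ hs'))
      rw [this, List.append_nil]
    · have ha : F a = [] := hz a List.mem_cons_self (fun hcon => (List.nodup_cons.mp hnd).1 (hcon ▸ hs'))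
      rw [ha, List.nil_append]
      exact ih (List.nodup_cons.mp hnd).2 hs' (fun s' h h' => hz s' (List.mem_cons_of_mem _ h) h')

-- ===== VERDICT (by name: the statement is the Claim_ definition above) =====
theorem limit_polyphony_per_step_spec : Claim_equal_limit_polyphony_per_step := by
  intro evs m hdom _hpre
  unfold Spec_limit_polyphony_per_step
  unfold limit_polyphony_per_step limit_polyphony_per_step_alt
  by_cases hm : m ≤ 0
  · rw [if_pos hm, if_pos hm]
  · rw [if_neg hm, if_neg hm]
    simp only []
    have hall : evs.all (fun ev => ev.all (fun p => pvDomStr p.1 && pvDomInt p.2)) = true := by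
      unfold Dom_limit_polyphony_per_step at hdom
      exact (Bool.and_eq_true _ _ |>.mp hdom).1
    rw [pvOutA evs m]
    refine pvSorted_classes pvKeyOut _ _ ?_
    intro v
    by_cases hex : ∃ e ∈ evs, pvKeyOut e = v
    · obtain ⟨e, he, hev⟩ := hex
      -- every event of evs in the class of v shares e's start_step
      have hstart : ∀ x ∈ evs, (pvKeyOut x == v) = true → pvFld x "start_step" = pvFld e "start_step" := by
        intro x hx hk
        have hkx : pvKeyOut x = pvKeyOut e := by rw [hev]; exact beq_iff_eq.mp hk
        exact (pvKeyOut_inj x e (pvFld_bound evs hall hx) (pvFld_bound evs hall he) hkx).1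
      have hclassG : ∀ x ∈ evs, (pvKeyOut x == v) = true → pvKeyGroup x = pvKeyGroup e := by
        intro x hx hk
        have hkx : pvKeyOut x = pvKeyOut e := by rw [hev]; exact beq_iff_eq.mp hk
        have h4 := pvKeyOut_inj x e (pvFld_bound evs hall hx) (pvFld_bound evs hall he) hkx
        exact pvKeyGroup_congr x e h4.2.1 h4.2.2.1 h4.2.2.2
      -- A side collapses to the single bucket of e's start_step
      rw [List.filter_flatMap]
      rw [pvFlatMap_single _ _ (pvFld e "start_step") (PySem.Set.nodup_ofList _)
          ((PySem.Set.mem_ofList _ _).mpr (List.mem_map.mpr ⟨e, he, rfl⟩)) ?hzero]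
      case hzero =>
        intro s' _ hne
        apply List.filter_eq_nil_iff.mpr
        intro x hx
        have hxg : x ∈ evs.filter (fun ev => pvFld ev "start_step" == s') := by
          by_cases hl : ((evs.filter (fun ev => pvFld ev "start_step" == s')).length : Int) ≤ m
          · rwa [if_pos hl] at hx
          · rw [if_neg hl] at hx
            exact (PySem.List.mem_sorted _ _ _ _).mp (List.mem_of_mem_take hx)
        have hxs' : pvFld x "start_step" = s' := by simpa using (List.mem_filter.mp hxg).2
        intro hk
        exact hne (hxs' ▸ hstart x (List.mem_filter.mp hxg).1 hk)
      -- B side: counting pass restricted to the class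
      have hBstep1 : (List.foldl (fun (st : List (List (String × Int)) × PySem.Dict Int Int) ev =>
            let s := pvFld ev "start_step"
            let c := st.2.getD s 0
            if c < m then (st.1 ++ [ev], st.2.insert s (c + 1)) else st)
            ([], PySem.Dict.empty) (PySem.List.sorted evs pvKeyAll)).1.filter (fun x => pvKeyOut x == v)
          = ((List.foldl (fun (st : List (List (String × Int)) × PySem.Dict Int Int) ev =>
            let s := pvFld ev "start_step"
            let c := st.2.getD s 0
            if c < m then (st.1 ++ [ev], st.2.insert s (c + 1)) else st)
            ([], PySem.Dict.empty) (PySem.List.sorted evs pvKeyAll)).1.filter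
              (fun x => pvFld x "start_step" == pvFld e "start_step")).filter (fun x => pvKeyOut x == v) := by
        rw [List.filter_filter]
        refine (List.filter_congr ?_)
        intro x hx
        have hxevs : x ∈ evs := by
          rcases pvKept_mem m _ _ x hx with h | h
          · cases h
          · exact (PySem.List.mem_sorted _ _ _ _).mp h
        cases hk : (pvKeyOut x == v) with
        | false => simp
        | true =>
          have := hstart x hxevs hk
          simp [this]
      rw [hBstep1]
      rw [pvKept_filter m (pvFld e "start_step") (PySem.List.sorted evs pvKeyAll) [] PySem.Dict.empty
          (fun t => by rw [PySem.Dict.getD_empty])]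
      rw [List.filter_nil, List.nil_append, PySem.Dict.getD_empty]
      rw [pvSorted_filter pvKeyAll (fun x => pvFld x "start_step" == pvFld e "start_step") evs]
      rw [pvSorted_congr pvKeyAll pvKeyGroup _ ?hcmp]
      case hcmp =>
        intro a b ha hb
        exact pvKeyAll_lt_iff a b (by
          have h1 : pvFld a "start_step" = pvFld e "start_step" := by simpa using (List.mem_filter.mp ha).2
          have h2 : pvFld b "start_step" = pvFld e "start_step" := by simpa using (List.mem_filter.mp hb).2
          rw [h1, h2])
      -- compare the two class lists bucket-by-bucket
      by_cases hlen : (((evs.filter (fun ev => pvFld ev "start_step" == pvFld e "start_step")).length : Int) ≤ m)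
      · rw [if_pos hlen]
        have htake : (PySem.List.sorted (evs.filter (fun ev => pvFld ev "start_step" == pvFld e "start_step"))
              pvKeyGroup).take (m.toNat - Int.toNat 0)
            = PySem.List.sorted (evs.filter (fun ev => pvFld ev "start_step" == pvFld e "start_step")) pvKeyGroup := by
          apply List.take_of_length_le
          rw [PySem.List.length_sorted]
          omega
        rw [htake]
        rw [pvSorted_filter pvKeyGroup (fun x => pvKeyOut x == v)]
        rw [pvSorted_const pvKeyGroup (pvKeyGroup e) _ ?hconst]
        case hconst =>
          intro x hx
          have hx1 := List.mem_filter.mp hx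
          exact hclassG x (List.mem_filter.mp hx1.1).1 hx1.2
      · rw [if_neg hlen]
        norm_num
    · -- v is no event's key: both classes are empty
      rw [List.filter_eq_nil_iff.mpr ?ha, List.filter_eq_nil_iff.mpr ?hb]
      case ha =>
        intro x hx
        have hxevs : x ∈ evs := by
          rcases List.mem_flatMap.mp hx with ⟨s', _, hxs⟩
          have hxg : x ∈ evs.filter (fun ev => pvFld ev "start_step" == s') := by
            by_cases hl : ((evs.filter (fun ev => pvFld ev "start_step" == s')).length : Int) ≤ m
            · rwa [if_pos hl] at hxs
            · rw [if_neg hl] at hxs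
              exact (PySem.List.mem_sorted _ _ _ _).mp (List.mem_of_mem_take hxs)
          exact (List.mem_filter.mp hxg).1
        simp only [beq_iff_eq]
        intro hk
        exact (hex ⟨x, hxevs, by simpa using hk⟩).elim
      case hb =>
        intro x hx
        have hxevs : x ∈ evs := by
          rcases pvKept_mem m _ _ x hx with h | h
          · cases h
          · exact (PySem.List.mem_sorted _ _ _ _).mp h
        simp only [beq_iff_eq]
        intro hk
        exact (hex ⟨x, hxevs, by simpa using hk⟩).elim
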